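-- pv_equiv track=rewrite | github.com/tvquizphd/tic-kan-toe | api/service/service.py | to_ngram_union
-- ===== SOURCE A (Python) =====
-- def to_ngrams(s,n):
--     for start in range(0, len(s) - n + 1):
--         yield s[start:start+n]
--
-- def to_ngram_union(guess, target, n):
--     ngrams_guess = set(to_ngrams(guess, n))
--     ngrams_target = set(to_ngrams(target, n))
--     union = ngrams_guess & ngrams_target
--     offset = 0 if not len(union) else min(
--         target.index(un) for un in union
--     )
--     return (union, offset)
-- ===== SOURCE B (Python) =====
-- def to_ngram_union(guess, target, n):
--     k_t = len(target) - n + 1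
--     target_grams = set(target[i:i + n] for i in range(k_t))
--     union = set(g for g in (guess[j:j + n] for j in range(len(guess) - n + 1))
--                 if g in target_grams)
--     offset = next((i for i in range(k_t) if target[i:i + n] in union), 0)
--     return (union, offset)
-- ===== Notes on version B (the rewrite author's own statement) =====
-- stated objective: alternative
-- what changed: B computes the offset by a single forward scan over target n-gram positions, taking the first position whose n-gram lies in the intersection, instead of A's per-union-element target.index substring search minimised over the whole intersection; the intersection itself is built by filtering guess n-grams against a target n-gram set.
-- outside the precondition, e.g. on to_ngram_union('ab', 'abc', -1): A returns ({''}, 0), B returns ({''}, 1)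
import Mathlib
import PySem

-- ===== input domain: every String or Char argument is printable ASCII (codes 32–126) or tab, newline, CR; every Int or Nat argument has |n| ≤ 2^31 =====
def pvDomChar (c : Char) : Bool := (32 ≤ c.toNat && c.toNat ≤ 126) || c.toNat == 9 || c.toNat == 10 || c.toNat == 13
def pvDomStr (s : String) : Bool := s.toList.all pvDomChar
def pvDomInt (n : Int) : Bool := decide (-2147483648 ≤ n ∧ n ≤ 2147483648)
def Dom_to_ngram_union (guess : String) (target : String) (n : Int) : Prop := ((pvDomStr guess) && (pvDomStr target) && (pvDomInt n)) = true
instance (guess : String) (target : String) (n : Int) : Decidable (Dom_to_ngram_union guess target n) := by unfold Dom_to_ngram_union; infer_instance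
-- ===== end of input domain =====

-- B replaces A's offset computation (min over target.index of every intersection element) by one
-- forward scan over target n-gram positions, taking the first position whose n-gram is in the
-- intersection; the intersection is built by filtering guess n-grams against the target n-gram set.

-- ===== PORT A =====
-- helper: literal port of the generator 'to_ngrams' (materialised as the list it yields)
def to_ngrams_port (s : List Char) (n : Int) : List (List Char) :=
  (PySem.List.pyRange 0 ((s.length : Int) - n + 1)).map
    (fun start => PySem.List.slice s (some start) (some (start + n)))

-- n-grams are kept as List Char (PySem string slicing is defined on toList) and wrapped with
-- String.ofList only in the returned pair. 'target.index(un)' is ported as PySem.Chars.find, which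
-- is exact here: every union element is an n-gram of target, so the search always succeeds.
def to_ngram_union (guess : String) (target : String) (n : Int) : List String × Int :=
  let ngrams_guess := PySem.Set.ofList (to_ngrams_port guess.toList n)
  let ngrams_target := PySem.Set.ofList (to_ngrams_port target.toList n)
  let union := PySem.Set.inter ngrams_guess ngrams_target
  let offset : Int :=
    if union.length = 0 then 0
    else (PySem.List.min? (union.map (fun un => PySem.Chars.find target.toList un))
            (fun x => x)).getD 0
  (union.map String.ofList, offset)

-- ===== PORT B =====
def to_ngram_union_alt (guess : String) (target : String) (n : Int) : List String × Int :=
  let t := target.toList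
  let kt : Int := (t.length : Int) - n + 1
  let target_grams := PySem.Set.ofList
    ((PySem.List.pyRange 0 kt).map (fun i => PySem.List.slice t (some i) (some (i + n))))
  let union := PySem.Set.ofList
    (((PySem.List.pyRange 0 ((guess.toList.length : Int) - n + 1)).map
        (fun j => PySem.List.slice guess.toList (some j) (some (j + n)))).filter
      (fun g => PySem.Set.contains target_grams g))
  -- next((i for i in range(k_t) if target[i:i+n] in union), 0)
  let offset : Int :=
    ((PySem.List.pyRange 0 kt).find?
        (fun i => PySem.Set.contains union (PySem.List.slice t (some i) (some (i + n))))).getD 0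
  (union.map String.ofList, offset)

-- ===== PRECONDITION & SPEC =====
-- Pre_ restricts n to the natural domain of an n-gram size, 0 ≤ n: for negative n the "n-grams"
-- are degenerate variable-length slices and A's min-of-index offset is an accident of slicing
-- that B's forward scan does not reproduce (A still returns there; see the cite in claim.json).
def Pre_to_ngram_union (guess : String) (target : String) (n : Int) : Prop := 0 ≤ n
instance (guess : String) (target : String) (n : Int) : Decidable (Pre_to_ngram_union guess target n) := by
  unfold Pre_to_ngram_union; infer_instance

def pvWitness_to_ngram_union : String × String × Int := ("abide", "ride", 2)

def Spec_to_ngram_union (guess : String) (target : String) (n : Int) (out : List String × Int) : Prop :=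
  out = to_ngram_union_alt guess target n
instance (guess : String) (target : String) (n : Int) (out : List String × Int) :
    Decidable (Spec_to_ngram_union guess target n out) := by unfold Spec_to_ngram_union; infer_instance

-- ===== CLAIM (what is proved, stated in full; the proofs are below) =====
def Claim_equal_to_ngram_union : Prop :=
  ∀ (guess : String) (target : String) (n : Int), Dom_to_ngram_union guess target n →
    Pre_to_ngram_union guess target n →
    Spec_to_ngram_union guess target n (to_ngram_union guess target n)

-- ===== LEMMAS AND PROOFS =====

-- the n-gram starting at position j
def gram (t : List Char) (k j : Nat) : List Char := (t.drop j).take k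

lemma pyRange_zero_one (b : Int) :
    PySem.List.pyRange 0 b = (List.range b.toNat).map Nat.cast := by
  unfold PySem.List.pyRange
  split_ifs <;> simp_all

lemma filter_add_pos (p : List Char → Bool) (x : List Char) (acc : List (List Char)) (hp : p x = true) :
    List.filter p (PySem.Set.add acc x) = PySem.Set.add (List.filter p acc) x := by
  simp only [PySem.Set.add, PySem.Set.contains]
  by_cases hc : acc.contains x
  · rw [if_pos hc, if_pos]
    simp only [List.contains_iff_mem] at *
    exact List.mem_filter.mpr ⟨hc, hp⟩
  · rw [if_neg hc, if_neg]
    · simp [List.filter_append, hp]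
    · simp only [List.contains_iff_mem, List.mem_filter] at *
      exact fun h => hc h.1

lemma filter_add_neg (p : List Char → Bool) (x : List Char) (acc : List (List Char)) (hp : p x = false) :
    List.filter p (PySem.Set.add acc x) = List.filter p acc := by
  simp only [PySem.Set.add]
  split
  · rfl
  · simp [List.filter_append, hp]

lemma filter_foldl_add (p : List Char → Bool) (xs acc : List (List Char)) :
    List.filter p (xs.foldl PySem.Set.add acc) = (xs.filter p).foldl PySem.Set.add (acc.filter p) := by
  induction xs generalizing acc with
  | nil => simp
  | cons x xs ih =>
    simp only [List.foldl_cons, List.filter_cons]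
    by_cases hp : p x
    · simp only [hp, if_pos, ih (PySem.Set.add acc x), filter_add_pos p x acc hp]
      rfl
    · simp only [hp]
      rw [ih (PySem.Set.add acc x), filter_add_neg p x acc (by simpa using hp)]
      simp

lemma inter_ofList_eq (xs : List (List Char)) (t : PySem.Set (List Char)) :
    PySem.Set.inter (PySem.Set.ofList xs) t
      = PySem.Set.ofList (xs.filter (fun x => PySem.Set.contains t x)) := by
  show List.filter _ (PySem.Set.ofList xs) = _
  simp only [PySem.Set.ofList]
  rw [filter_foldl_add]
  rfl

lemma find?_range_eq_some (p : Nat → Bool) (m j : Nat) (h : (List.range m).find? p = some j) :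
    j < m ∧ p j = true ∧ ∀ i < j, p i = false := by
  rw [List.find?_eq_some_iff_append] at h
  obtain ⟨hp, l₁, l₂, heq, hmin⟩ := h
  have hjm : j < m := by
    have : j ∈ List.range m := by rw [heq]; simp
    simpa using this
  have hlm : l₁.length < m := by
    have := congrArg List.length heq; simp at this; omega
  have hlen : l₁.length = j := by
    have h1 : (List.range m)[l₁.length]'(by simpa using hlm) = l₁.length := List.getElem_range _
    rw [List.getElem_of_eq heq, List.getElem_append_right (le_refl _)] at h1
    simpa using h1.symm
  refine ⟨hjm, hp, fun i hij => ?_⟩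
  have him : i < m := by omega
  have hi1 : (List.range m)[i]'(by simpa using him) = i := List.getElem_range _
  rw [List.getElem_of_eq heq, List.getElem_append_left (by omega)] at hi1
  have : i ∈ l₁ := hi1 ▸ List.getElem_mem _
  simpa using hmin i this

lemma prefix_iff_gram (t u : List Char) (k j : Nat) (hu : u.length = k)
    (hj : j ≤ t.length) :
    u <+: t.drop j ↔ (j + k ≤ t.length ∧ gram t k j = u) := by
  constructor
  · intro h
    have hlen := h.length_le
    simp only [List.length_drop] at hlen
    rw [hu] at hlen
    refine ⟨by omega, ?_⟩
    have := List.prefix_iff_eq_take.mp h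
    rw [hu] at this
    exact this.symm
  · rintro ⟨_, h2⟩
    rw [← h2]
    exact (t.drop j).take_prefix k

lemma gram_infix (t : List Char) (k j : Nat) : gram t k j <:+: t :=
  ((t.drop j).take_prefix k).isInfix.trans (t.drop_suffix j).isInfix

lemma gram_len (t : List Char) (k j : Nat) (h : j + k ≤ t.length) : (gram t k j).length = k := by
  simp [gram]; omega

-- the heart of the equivalence: A's min-of-first-occurrence equals B's first scanned position
lemma offset_eq (t : List Char) (k m : Nat) (hm : m + k = t.length + 1)
    (U : List (List Char)) (hU : ∀ u ∈ U, ∃ j, j < m ∧ gram t k j = u) :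
    (if U.length = 0 then (0 : Int)
     else (PySem.List.min? (U.map (fun un => PySem.Chars.find t un)) (fun x => x)).getD 0)
    = (Option.map (Nat.cast : Nat → Int)
        (List.find? (fun j => U.contains (gram t k j)) (List.range m))).getD 0 := by
  by_cases hUe : U = []
  · subst hUe
    simp only [List.length_nil, if_pos]
    rw [List.find?_eq_none.mpr (fun x _ => by simp)]
    rfl
  · have hne : U.length ≠ 0 := by simpa [List.length_eq_zero_iff] using hUe
    rw [if_neg hne]
    obtain ⟨u₀, hu₀⟩ := List.exists_mem_of_ne_nil U hUe
    -- B's scan finds something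
    obtain ⟨j', hj'm, hgj'⟩ := hU u₀ hu₀
    obtain ⟨j₀, hj₀⟩ : ∃ j₀, (List.range m).find? (fun j => U.contains (gram t k j)) = some j₀ := by
      cases h : (List.range m).find? (fun j => U.contains (gram t k j)) with
      | none =>
        rw [List.find?_eq_none] at h
        have hc : U.contains (gram t k j') = true := by
          rw [hgj']
          exact (List.contains_iff_mem).mpr hu₀
        exact absurd hc (by simpa using h j' (List.mem_range.mpr hj'm))
      | some j₀ => exact ⟨j₀, rfl⟩
    obtain ⟨hj₀m, hpj₀, hminj₀⟩ := find?_range_eq_some _ _ _ hj₀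
    have hg₀U : gram t k j₀ ∈ U := (List.contains_iff_mem).mp hpj₀
    -- A's min is defined
    obtain ⟨v, hv⟩ : ∃ v, PySem.List.min? (U.map (fun un => PySem.Chars.find t un))
        (fun x => x) = some v := by
      cases h : PySem.List.min? (U.map (fun un => PySem.Chars.find t un)) (fun x => x) with
      | none =>
        rw [PySem.List.min?_eq_none_iff] at h
        exact absurd (List.map_eq_nil_iff.mp h) hUe
      | some v => exact ⟨v, rfl⟩
    -- every union element first occurs at position ≥ j₀
    have key_low : ∀ u ∈ U, (j₀ : Int) ≤ PySem.Chars.find t u := by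
      intro u hu
      obtain ⟨j, hjm, hgj⟩ := hU u hu
      have hjk : j + k ≤ t.length := by omega
      have hulen : u.length = k := hgj ▸ gram_len t k j hjk
      have hinf : u <:+: t := hgj ▸ gram_infix t k j
      have hnn : 0 ≤ PySem.Chars.find t u := (PySem.Chars.find_nonneg_iff t u).mpr hinf
      obtain ⟨hpre, _⟩ := PySem.Chars.find_spec hnn
      have hjle : (PySem.Chars.find t u).toNat ≤ t.length := by
        have := PySem.Chars.find_le_length t u
        omega
      obtain ⟨hjk', hgram'⟩ :=
        (prefix_iff_gram t u k (PySem.Chars.find t u).toNat hulen hjle).mp hpre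
      have hjsm : (PySem.Chars.find t u).toNat < m := by omega
      have hpjs : U.contains (gram t k (PySem.Chars.find t u).toNat) = true := by
        rw [hgram']
        exact (List.contains_iff_mem).mpr hu
      rcases Nat.lt_or_ge (PySem.Chars.find t u).toNat j₀ with hlt | hge
      · exfalso
        have hfalse := hminj₀ _ hlt
        rw [hpjs] at hfalse
        simp at hfalse
      · omega
    -- the n-gram at j₀ first occurs at position ≤ j₀
    have key_high : PySem.Chars.find t (gram t k j₀) ≤ (j₀ : Int) := by
      have hinf : gram t k j₀ <:+: t := gram_infix t k j₀
      have hnn : 0 ≤ PySem.Chars.find t (gram t k j₀) :=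
        (PySem.Chars.find_nonneg_iff t _).mpr hinf
      obtain ⟨_, hminf⟩ := PySem.Chars.find_spec hnn
      rcases Nat.lt_or_ge j₀ (PySem.Chars.find t (gram t k j₀)).toNat with hlt | hge
      · exact absurd ((t.drop j₀).take_prefix k) (hminf j₀ hlt)
      · omega
    -- combine
    have hvm := PySem.List.min?_mem hv
    obtain ⟨u₁, hu₁U, hu₁⟩ := List.mem_map.mp hvm
    have hvmin := PySem.List.min?_isMin hv (PySem.Chars.find t (gram t k j₀))
      (List.mem_map.mpr ⟨gram t k j₀, hg₀U, rfl⟩)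
    have h1 : (j₀ : Int) ≤ v := hu₁ ▸ key_low u₁ hu₁U
    have h2 : v ≤ (j₀ : Int) := le_trans hvmin key_high
    rw [hv, hj₀]
    simp only [Option.map_some, Option.getD_some]
    omega

-- the n-gram list of a string, normalised (0 ≤ n, k = n.toNat)
lemma to_ngrams_eq (s : List Char) (n : Int) (k : Nat) (hk : n = (k : Int)) :
    to_ngrams_port s n = (List.range ((s.length : Int) - n + 1).toNat).map (gram s k) := by
  unfold to_ngrams_port
  rw [pyRange_zero_one, List.map_map]
  apply List.map_congr_left
  intro j _
  show PySem.List.slice s (some (j : Int)) (some ((j : Int) + n)) = gram s k j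
  rw [hk]
  exact PySem.List.slice_natCast_add s j k

-- ===== VERDICT (by name: the statement is the Claim_ definition above) =====
theorem to_ngram_union_spec : Claim_equal_to_ngram_union := by
  intro guess target n _ hn
  unfold Spec_to_ngram_union to_ngram_union to_ngram_union_alt
  obtain ⟨k, hk⟩ : ∃ k : Nat, n = (k : Int) := ⟨n.toNat, (Int.toNat_of_nonneg hn).symm⟩
  set t := target.toList with ht
  set g := guess.toList with hg
  set M : Nat := ((t.length : Int) - n + 1).toNat with hM
  -- both n-gram lists in gram form
  have htg : to_ngrams_port t n = (List.range M).map (gram t k) := to_ngrams_eq t n k hk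
  have hgg : to_ngrams_port g n
      = (List.range ((g.length : Int) - n + 1).toNat).map (gram g k) := to_ngrams_eq g n k hk
  -- B's slice expressions are the same lists
  have hsliceT : ((PySem.List.pyRange 0 ((t.length : Int) - n + 1)).map
      (fun i => PySem.List.slice t (some i) (some (i + n)))) = (List.range M).map (gram t k) := htg
  have hsliceG : ((PySem.List.pyRange 0 ((g.length : Int) - n + 1)).map
      (fun j => PySem.List.slice g (some j) (some (j + n))))
      = (List.range ((g.length : Int) - n + 1).toNat).map (gram g k) := hgg
  -- the two unions coincide
  have hunion : PySem.Set.inter (PySem.Set.ofList (to_ngrams_port g n))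
      (PySem.Set.ofList (to_ngrams_port t n))
      = PySem.Set.ofList ((to_ngrams_port g n).filter
          (fun x => PySem.Set.contains (PySem.Set.ofList (to_ngrams_port t n)) x)) :=
    inter_ofList_eq _ _
  simp only [hsliceT, hsliceG, ← htg, ← hgg, hunion]
  set U := PySem.Set.ofList ((to_ngrams_port g n).filter
      (fun x => PySem.Set.contains (PySem.Set.ofList (to_ngrams_port t n)) x)) with hU
  -- membership characterisation of U
  have hUmem : ∀ u ∈ U, ∃ j, j < M ∧ gram t k j = u := by
    intro u hu
    rw [hU, PySem.Set.mem_ofList, List.mem_filter] at hu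
    obtain ⟨-, hc⟩ := hu
    rw [show (PySem.Set.contains (PySem.Set.ofList (to_ngrams_port t n)) u)
        = List.contains (PySem.Set.ofList (to_ngrams_port t n)) u from rfl,
      List.contains_iff_mem, PySem.Set.mem_ofList, htg, List.mem_map] at hc
    obtain ⟨j, hj, hgram⟩ := hc
    exact ⟨j, by simpa using hj, hgram⟩
  -- second components agree
  have hpred : ((fun i => PySem.Set.contains U (PySem.List.slice t (some i) (some (i + n))))
        ∘ (Nat.cast : Nat → Int))
      = (fun j : Nat => U.contains (gram t k j)) := by
    funext j
    show PySem.Set.contains U (PySem.List.slice t (some (j : Int)) (some ((j : Int) + n)))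
        = U.contains (gram t k j)
    rw [hk, PySem.List.slice_natCast_add]
    rfl
  have hoff : (if U.length = 0 then (0 : Int)
      else (PySem.List.min? (U.map (fun un => PySem.Chars.find t un)) (fun x => x)).getD 0)
      = ((PySem.List.pyRange 0 ((t.length : Int) - n + 1)).find?
          (fun i => PySem.Set.contains U (PySem.List.slice t (some i) (some (i + n))))).getD 0 := by
    rw [pyRange_zero_one, List.find?_map, hpred]
    by_cases hkt : k ≤ t.length
    · exact offset_eq t k M (by omega) U hUmem
    · -- n exceeds the target length: no target n-grams, hence U = [] and both offsets are 0
      have hM0 : M = 0 := by omega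
      have hUe : U = [] := by
        rcases h : U with _ | ⟨u, us⟩
        · rfl
        · exfalso
          obtain ⟨j, hj, -⟩ := hUmem u (h ▸ List.mem_cons_self)
          omega
      rw [hUe]
      rw [show ((t.length : Int) - n + 1).toNat = M from rfl, hM0]
      simp
  rw [hoff]
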